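-- pv_equiv track=rewrite | github.com/ruksol/reAVS | scanners/cryptography.py | _iv_fingerprint_value
-- ===== SOURCE A (Python) =====
-- from typing import List, Dict
--
-- def _iv_fingerprint_value(field_refs: set, field_values: Dict[tuple, str | None], literal_values: set) -> str:
--     values = []
--     for ref in sorted(field_refs):
--         value = field_values.get(ref)
--         if value:
--             values.append(value)
--     values.extend(sorted(v for v in literal_values if v))
--     if values:
--         return values[0]
--     return ""
-- ===== SOURCE B (Python) =====
-- def _iv_fingerprint_value(field_refs: set, field_values, literal_values: set) -> str:
--     # The first truthy value in A's priority order is the value of the MINIMAL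
--     # ref whose lookup is truthy, else the minimal truthy literal: two min-scans,
--     # no sorting and no intermediate list.
--     best_ref = None
--     for ref in field_refs:
--         if field_values.get(ref) and (best_ref is None or ref < best_ref):
--             best_ref = ref
--     if best_ref is not None:
--         return field_values[best_ref]
--     best = ""
--     for v in literal_values:
--         if v and (not best or v < best):
--             best = v
--     return best
-- ===== Notes on version B (the rewrite author's own statement) =====
-- stated objective: alternative
-- what changed: Replaces sort-both-sources-then-collect-and-index-[0] by two sort-free minimum scans: a single pass picking the lexicographically minimal ref with a truthy lookup (returning its value), else a single pass picking the minimal truthy literal.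
import Mathlib
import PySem

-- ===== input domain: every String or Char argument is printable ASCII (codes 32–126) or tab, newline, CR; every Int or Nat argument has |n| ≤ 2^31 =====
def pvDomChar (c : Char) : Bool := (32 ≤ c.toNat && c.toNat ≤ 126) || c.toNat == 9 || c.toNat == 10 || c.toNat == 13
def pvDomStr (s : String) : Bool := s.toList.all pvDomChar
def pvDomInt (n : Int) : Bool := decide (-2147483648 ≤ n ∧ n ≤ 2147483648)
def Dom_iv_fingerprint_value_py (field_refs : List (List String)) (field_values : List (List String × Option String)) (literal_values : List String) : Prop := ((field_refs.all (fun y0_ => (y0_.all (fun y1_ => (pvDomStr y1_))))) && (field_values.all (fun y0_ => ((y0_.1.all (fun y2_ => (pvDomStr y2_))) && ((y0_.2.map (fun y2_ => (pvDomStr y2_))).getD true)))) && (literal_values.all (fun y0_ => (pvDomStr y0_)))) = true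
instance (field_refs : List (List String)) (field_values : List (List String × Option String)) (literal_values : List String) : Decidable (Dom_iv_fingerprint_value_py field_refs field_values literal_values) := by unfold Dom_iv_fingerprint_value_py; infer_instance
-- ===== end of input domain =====

-- B replaces A's sort-both-sources-then-take-values[0] by two sort-free minimum scans (alternative; return value only).

-- ===== PORT A =====
-- 'for ref in sorted(field_refs): value = field_values.get(ref); if value: values.append(value)'
def pvStepA (field_values : List (List String × Option String)) (acc : List String) (ref : List String) : List String :=
  match field_values.lookup ref with
  | some (some v) => if v = "" then acc else acc ++ [v]
  | _ => acc

def iv_fingerprint_value_py (field_refs : List (List String)) (field_values : List (List String × Option String)) (literal_values : List String) : String :=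
  let values := (PySem.List.sorted field_refs (fun x => x) false).foldl (pvStepA field_values) []
  let values := values ++ PySem.List.sorted (literal_values.filter (fun v => v ≠ "")) (fun x => x) false
  values.headD ""

-- ===== PORT B =====
-- the shared test 'field_values.get(ref)' is truthy
def pvP (field_values : List (List String × Option String)) (ref : List String) : Bool :=
  match field_values.lookup ref with | some (some v) => v ≠ "" | _ => false

-- 'if field_values.get(ref) and (best_ref is None or ref < best_ref): best_ref = ref'
def pvBestRefStep (field_values : List (List String × Option String)) (acc : Option (List String)) (ref : List String) : Option (List String) :=
  if pvP field_values ref then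
    match acc with
    | none => some ref
    | some b => if ref < b then some ref else some b
  else acc

-- 'if v and (not best or v < best): best = v'
def pvBestLitStep (best v : String) : String :=
  if v ≠ "" ∧ (best = "" ∨ v < best) then v else best

def iv_fingerprint_value_py_alt (field_refs : List (List String)) (field_values : List (List String × Option String)) (literal_values : List String) : String :=
  match field_refs.foldl (pvBestRefStep field_values) none with
  | some b => (match field_values.lookup b with | some (some v) => v | _ => "")  -- field_values[best_ref]; the fallback is unreachable (the chosen ref was looked up truthy)
  | none => literal_values.foldl pvBestLitStep ""

-- ===== PRECONDITION & SPEC =====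
def Spec_iv_fingerprint_value_py (field_refs : List (List String)) (field_values : List (List String × Option String)) (literal_values : List String) (out : String) : Prop := out = iv_fingerprint_value_py_alt field_refs field_values literal_values
instance (field_refs : List (List String)) (field_values : List (List String × Option String)) (literal_values : List String) (out : String) : Decidable (Spec_iv_fingerprint_value_py field_refs field_values literal_values out) := by unfold Spec_iv_fingerprint_value_py; infer_instance

-- ===== CLAIM (what is proved, stated in full; the proofs are below) =====
def Claim_equal_iv_fingerprint_value_py : Prop := ∀ (field_refs : List (List String)) (field_values : List (List String × Option String)) (literal_values : List String), Dom_iv_fingerprint_value_py field_refs field_values literal_values → Spec_iv_fingerprint_value_py field_refs field_values literal_values (iv_fingerprint_value_py field_refs field_values literal_values)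

-- ===== LEMMAS AND PROOFS =====

def pvVal (field_values : List (List String × Option String)) (ref : List String) : String :=
  match field_values.lookup ref with | some (some v) => v | _ => ""

lemma pvStepA_eq (fv : List (List String × Option String)) (acc : List String) (r : List String) :
    pvStepA fv acc r = if pvP fv r then acc ++ [pvVal fv r] else acc := by
  unfold pvStepA pvP pvVal
  cases fv.lookup r with
  | none => simp
  | some o => cases o with
    | none => simp
    | some v => by_cases hv : v = "" <;> simp [hv]

lemma pvFoldA (fv : List (List String × Option String)) (l : List (List String)) :
    l.foldl (pvStepA fv) [] = (l.filter (pvP fv)).map (pvVal fv) := by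
  have h : pvStepA fv = fun acc r => if pvP fv r then acc ++ [pvVal fv r] else acc := by
    funext acc r; exact pvStepA_eq fv acc r
  rw [h]
  simpa using PySem.List.foldl_append_if (pvP fv) (pvVal fv) l []

-- B's best-ref fold from a some-accumulator: stays some, and the result is the minimum
lemma pvBestRef_some (fv : List (List String × Option String)) (l : List (List String)) (a : List String) :
    ∃ b, l.foldl (pvBestRefStep fv) (some a) = some b ∧ (b = a ∨ (b ∈ l ∧ pvP fv b = true)) ∧ b ≤ a ∧
      (∀ y ∈ l, pvP fv y = true → b ≤ y) := by
  induction l generalizing a with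
  | nil => exact ⟨a, rfl, Or.inl rfl, le_refl a, by simp⟩
  | cons r t ih =>
    simp only [List.foldl_cons]
    by_cases hp : pvP fv r = true
    · by_cases hlt : r < a
      · have hstep : pvBestRefStep fv (some a) r = some r := by
          unfold pvBestRefStep; simp [hp, hlt]
        rw [hstep]
        obtain ⟨b, hfold, hmem, hle, hmin⟩ := ih r
        refine ⟨b, hfold, ?_, le_trans hle (le_of_lt hlt), ?_⟩
        · rcases hmem with rfl | ⟨hb, hpb⟩
          · exact Or.inr ⟨by simp, hp⟩
          · exact Or.inr ⟨by simp [hb], hpb⟩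
        · intro y hy hpy
          rw [List.mem_cons] at hy
          rcases hy with rfl | hy
          · exact hle
          · exact hmin y hy hpy
      · have hstep : pvBestRefStep fv (some a) r = some a := by
          unfold pvBestRefStep; simp [hp, hlt]
        rw [hstep]
        obtain ⟨b, hfold, hmem, hle, hmin⟩ := ih a
        refine ⟨b, hfold, ?_, hle, ?_⟩
        · rcases hmem with rfl | ⟨hb, hpb⟩
          · exact Or.inl rfl
          · exact Or.inr ⟨by simp [hb], hpb⟩
        · intro y hy hpy
          rw [List.mem_cons] at hy
          rcases hy with rfl | hy
          · exact le_trans hle (not_lt.mp hlt)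
          · exact hmin y hy hpy
    · have hstep : pvBestRefStep fv (some a) r = some a := by
        unfold pvBestRefStep; simp [hp]
      rw [hstep]
      obtain ⟨b, hfold, hmem, hle, hmin⟩ := ih a
      refine ⟨b, hfold, ?_, hle, ?_⟩
      · rcases hmem with rfl | ⟨hb, hpb⟩
        · exact Or.inl rfl
        · exact Or.inr ⟨by simp [hb], hpb⟩
      · intro y hy hpy
        rw [List.mem_cons] at hy
        rcases hy with rfl | hy
        · exact absurd hpy hp
        · exact hmin y hy hpy

lemma pvBestRef_none_iff (fv : List (List String × Option String)) (l : List (List String)) :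
    l.foldl (pvBestRefStep fv) none = none ↔ ∀ r ∈ l, pvP fv r = false := by
  induction l with
  | nil => simp
  | cons r t ih =>
    simp only [List.foldl_cons]
    by_cases hp : pvP fv r = true
    · have hstep : pvBestRefStep fv none r = some r := by
        unfold pvBestRefStep; simp [hp]
      rw [hstep]
      obtain ⟨b, hfold, -⟩ := pvBestRef_some fv t r
      simp [hfold, hp]
    · have hstep : pvBestRefStep fv none r = none := by
        unfold pvBestRefStep; simp [hp]
      rw [hstep, ih]
      constructor
      · intro h y hy
        rw [List.mem_cons] at hy
        rcases hy with rfl | hy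
        · exact eq_false_of_ne_true hp
        · exact h y hy
      · intro h y hy; exact h y (by simp [hy])

lemma pvBestRef_spec (fv : List (List String × Option String)) (l : List (List String)) (b : List String)
    (h : l.foldl (pvBestRefStep fv) none = some b) :
    b ∈ l ∧ pvP fv b = true ∧ ∀ y ∈ l, pvP fv y = true → b ≤ y := by
  induction l with
  | nil => simp at h
  | cons r t ih =>
    simp only [List.foldl_cons] at h
    by_cases hp : pvP fv r = true
    · have hstep : pvBestRefStep fv none r = some r := by
        unfold pvBestRefStep; simp [hp]
      rw [hstep] at h
      obtain ⟨b', hfold, hmem, hle, hmin⟩ := pvBestRef_some fv t r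
      rw [hfold] at h
      cases h
      refine ⟨?_, ?_, ?_⟩
      · rcases hmem with rfl | ⟨hb, _⟩
        · simp
        · simp [hb]
      · rcases hmem with rfl | ⟨_, hpb⟩
        · exact hp
        · exact hpb
      · intro y hy hpy
        rw [List.mem_cons] at hy
        rcases hy with rfl | hy
        · exact hle
        · exact hmin y hy hpy
    · have hstep : pvBestRefStep fv none r = none := by
        unfold pvBestRefStep; simp [hp]
      rw [hstep] at h
      obtain ⟨hb, hpb, hmin⟩ := ih h
      refine ⟨by simp [hb], hpb, ?_⟩
      intro y hy hpy
      rw [List.mem_cons] at hy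
      rcases hy with rfl | hy
      · exact absurd hpy hp
      · exact hmin y hy hpy

-- B's literal fold: "" means no truthy literal seen yet; otherwise the minimum truthy literal so far
lemma pvBestLit_some (l : List String) (a : String) (ha : a ≠ "") :
    ∃ b, l.foldl pvBestLitStep a = b ∧ (b = a ∨ b ∈ l) ∧ b ≠ "" ∧ b ≤ a ∧
      (∀ v ∈ l, v ≠ "" → b ≤ v) := by
  induction l generalizing a with
  | nil => exact ⟨a, rfl, Or.inl rfl, ha, le_refl a, by simp⟩
  | cons v t ih =>
    simp only [List.foldl_cons]
    by_cases hv : v ≠ "" ∧ (a = "" ∨ v < a)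
    · have hva : v < a := (hv.2).resolve_left ha
      have hstep : pvBestLitStep a v = v := by unfold pvBestLitStep; exact if_pos hv
      rw [hstep]
      obtain ⟨b, hfold, hmem, hbne, hble, hmin⟩ := ih v hv.1
      refine ⟨b, hfold, ?_, hbne, le_trans hble (le_of_lt hva), ?_⟩
      · rcases hmem with rfl | hb
        · exact Or.inr (by simp)
        · exact Or.inr (by simp [hb])
      · intro y hy hyne
        rw [List.mem_cons] at hy
        rcases hy with rfl | hy
        · exact hble
        · exact hmin y hy hyne
    · have hstep : pvBestLitStep a v = a := by unfold pvBestLitStep; exact if_neg hv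
      rw [hstep]
      obtain ⟨b, hfold, hmem, hbne, hble, hmin⟩ := ih a ha
      refine ⟨b, hfold, ?_, hbne, hble, ?_⟩
      · rcases hmem with rfl | hb
        · exact Or.inl rfl
        · exact Or.inr (by simp [hb])
      · intro y hy hyne
        rw [List.mem_cons] at hy
        rcases hy with rfl | hy
        · have hnlt : ¬ y < a := fun hlt => hv ⟨hyne, Or.inr hlt⟩
          exact le_trans hble (not_lt.mp hnlt)
        · exact hmin y hy hyne

lemma pvBestLit_spec (l : List String) :
    (l.foldl pvBestLitStep "" = "" ∧ ∀ v ∈ l, v = "") ∨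
      (l.foldl pvBestLitStep "" ∈ l ∧ l.foldl pvBestLitStep "" ≠ "" ∧
        ∀ v ∈ l, v ≠ "" → l.foldl pvBestLitStep "" ≤ v) := by
  induction l with
  | nil => exact Or.inl ⟨rfl, by simp⟩
  | cons v t ih =>
    simp only [List.foldl_cons]
    by_cases hv : v = ""
    · have hstep : pvBestLitStep "" v = "" := by
        unfold pvBestLitStep; exact if_neg (fun hc => hc.1 hv)
      rw [hstep]
      rcases ih with ⟨h1, h2⟩ | ⟨h1, h2, h3⟩
      · refine Or.inl ⟨h1, ?_⟩
        intro y hy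
        rw [List.mem_cons] at hy
        rcases hy with rfl | hy
        · exact hv
        · exact h2 y hy
      · refine Or.inr ⟨by simp [h1], h2, ?_⟩
        intro y hy hyne
        rw [List.mem_cons] at hy
        rcases hy with rfl | hy
        · exact absurd hv hyne
        · exact h3 y hy hyne
    · have hstep : pvBestLitStep "" v = v := by
        unfold pvBestLitStep; exact if_pos ⟨hv, Or.inl rfl⟩
      rw [hstep]
      obtain ⟨b, hfold, hmem, hbne, hble, hmin⟩ := pvBestLit_some t v hv
      rw [hfold]
      refine Or.inr ⟨?_, hbne, ?_⟩
      · rcases hmem with rfl | hb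
        · simp
        · simp [hb]
      · intro y hy hyne
        rw [List.mem_cons] at hy
        rcases hy with rfl | hy
        · exact hble
        · exact hmin y hy hyne

-- A's literal tail: head of the sorted truthy literals equals B's literal fold
lemma pvLit_eq (lv : List String) :
    (PySem.List.sorted (lv.filter (fun v => v ≠ "")) (fun x => x) false).headD "" =
      lv.foldl pvBestLitStep "" := by
  rcases pvBestLit_spec lv with ⟨h1, h2⟩ | ⟨h1, h2, h3⟩
  · have hf : lv.filter (fun v => v ≠ "") = [] := by
      rw [List.filter_eq_nil_iff]
      intro v hv
      simp [h2 v hv]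
    rw [hf, h1]
    rfl
  · set r := lv.foldl pvBestLitStep ""
    cases hs : PySem.List.sorted (lv.filter (fun v => v ≠ "")) (fun x => x) false with
    | nil =>
      exfalso
      have hnil := (PySem.List.sorted_eq_nil_iff (lv.filter (fun v => v ≠ "")) (fun x : String => x) false).mp hs
      rw [List.filter_eq_nil_iff] at hnil
      have hr := hnil r h1
      simp at hr
      exact h2 hr
    | cons m t =>
      have hm : m ∈ lv.filter (fun v => v ≠ "") := by
        have hmem : m ∈ PySem.List.sorted (lv.filter (fun v => v ≠ "")) (fun x : String => x) false := by
          rw [hs]; simp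
        exact (PySem.List.mem_sorted _ _ _ _).mp hmem
      have hm1 : m ∈ lv := (List.mem_filter.mp hm).1
      have hm2 : m ≠ "" := by
        have := (List.mem_filter.mp hm).2
        simpa using this
      have hmin := PySem.List.key_head_sorted_le (key := fun x : String => x) (h := hs)
      have h1' : r ≤ m := h3 m hm1 hm2
      have h2' : m ≤ r := hmin r (by rw [List.mem_filter]; exact ⟨h1, by simpa using h2⟩)
      simp [le_antisymm h1' h2']

-- ===== VERDICT (by name: the statement is the Claim_ definition above) =====
theorem iv_fingerprint_value_py_spec : Claim_equal_iv_fingerprint_value_py := by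
  intro field_refs field_values literal_values _
  unfold Spec_iv_fingerprint_value_py iv_fingerprint_value_py iv_fingerprint_value_py_alt
  simp only [pvFoldA]
  set s := PySem.List.sorted field_refs (fun x => x) false with hsdef
  have hperm : ∀ y : List String, y ∈ s ↔ y ∈ field_refs := fun y => PySem.List.mem_sorted _ _ _ _
  cases hb : field_refs.foldl (pvBestRefStep field_values) none with
  | none =>
    have hall := (pvBestRef_none_iff field_values field_refs).mp hb
    have hf : s.filter (pvP field_values) = [] := by
      rw [List.filter_eq_nil_iff]
      intro y hy
      simp [hall y ((hperm y).mp hy)]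
    rw [hf]
    simpa using pvLit_eq literal_values
  | some b =>
    obtain ⟨hbmem, hbp, hbmin⟩ := pvBestRef_spec field_values field_refs b hb
    cases hf : s.filter (pvP field_values) with
    | nil =>
      exfalso
      rw [List.filter_eq_nil_iff] at hf
      exact absurd hbp (by simpa using hf b ((hperm b).mpr hbmem))
    | cons x0 t =>
      have hx0 : x0 ∈ s.filter (pvP field_values) := by simp [hf]
      rw [List.mem_filter] at hx0
      have hpair : s.Pairwise (fun a b => a ≤ b) := by
        rw [hsdef]
        have he : (PySem.List.sorted field_refs (fun x : List String => x) false)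
            = @PySem.List.sorted (List String) (List String) List.instLinearOrder.toLT
                LinearOrder.toDecidableLT field_refs (fun x => x) false := by
          congr 1
        rw [he]
        exact PySem.List.sorted_pairwise field_refs (fun x : List String => x)
      have hpairf : (s.filter (pvP field_values)).Pairwise (· ≤ ·) := hpair.filter _
      rw [hf] at hpairf
      have hx0min : ∀ y ∈ s.filter (pvP field_values), x0 ≤ y := by
        intro y hy
        rw [hf, List.mem_cons] at hy
        rcases hy with rfl | hy
        · exact le_refl y
        · exact (List.pairwise_cons.mp hpairf).1 y hy
      have h1 : b ≤ x0 := hbmin x0 ((hperm x0).mp hx0.1) hx0.2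
      have h2 : x0 ≤ b := hx0min b (by rw [List.mem_filter]; exact ⟨(hperm b).mpr hbmem, hbp⟩)
      have hbx : x0 = b := le_antisymm h2 h1
      subst hbx
      simp [pvVal]
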